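-- pv_equiv track=rewrite | github.com/okfinethanks/EE308lab2 | lab2.py | Advanced
-- ===== SOURCE A (Python) =====
-- def Advanced(Key_words):
--
--     case_num = []
--     structure_num = 0
--     while True:
--         num = 0
--         if 'default' in Key_words:
--             subscript = Key_words.index('default')
--             structure_num += 1                                                               # The number of SwitchCase structures is identified by the number of default
--             for word in Key_words[:subscript]:
--                 if word == 'case':
--                     num += 1
--             case_num.append(num)                                                              #dentify the number of cases in each group
--             del Key_words[:subscript + 1]
--         else:
--             break
--     return case_num, structure_num
-- ===== SOURCE B (Python) =====
-- def Advanced(Key_words):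
--     # Single forward pass; returns the same value as A. (A also deletes the
--     # processed prefix of Key_words in place; B does not mutate its argument.)
--     case_num = []
--     structure_num = 0
--     cur = 0
--     for w in Key_words:
--         if w == 'default':
--             case_num.append(cur)
--             structure_num += 1
--             cur = 0
--         elif w == 'case':
--             cur += 1
--     return case_num, structure_num
-- ===== Notes on version B (the rewrite author's own statement) =====
-- stated objective: simpler
-- what changed: Replaces the while-loop that repeatedly scans for 'default' with index/slice/del by a single left-to-right pass keeping a running case counter that is flushed at each 'default'; B does not mutate the input list.
import Mathlib
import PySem

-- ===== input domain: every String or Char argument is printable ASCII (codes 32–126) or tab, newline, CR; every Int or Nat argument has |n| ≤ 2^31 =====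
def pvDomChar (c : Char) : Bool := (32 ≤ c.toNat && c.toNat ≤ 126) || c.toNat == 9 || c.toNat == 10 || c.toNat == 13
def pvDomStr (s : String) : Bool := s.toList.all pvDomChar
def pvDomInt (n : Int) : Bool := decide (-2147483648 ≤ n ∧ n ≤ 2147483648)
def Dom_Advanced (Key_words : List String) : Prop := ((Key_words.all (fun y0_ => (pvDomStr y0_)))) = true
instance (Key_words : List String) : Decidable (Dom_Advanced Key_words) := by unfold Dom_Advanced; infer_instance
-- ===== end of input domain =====

-- B replaces A's repeated index/slice/del scans by one left-to-right pass with a running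
-- counter; equivalence is about the RETURN value only — A also deletes the processed
-- prefix of Key_words in place, B leaves its argument unchanged.

-- ===== PORT A =====
def AdvancedLoop (ws : List String) (case_num : List Int) (structure_num : Int) : List Int × Int :=
  match h : PySem.List.index? ws "default" with
  | some subscript =>
      let num : Int := (PySem.List.slice ws none (some ((subscript : Nat) : Int))).foldl
        (fun n word => if word == "case" then n + 1 else n) 0
      AdvancedLoop (PySem.List.slice ws (some (((subscript + 1 : Nat)) : Int)) none)
        (case_num ++ [num]) (structure_num + 1)
  | none => (case_num, structure_num)
termination_by ws.length
decreasing_by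
  rw [PySem.List.slice_from_natCast]
  have hmem : "default" ∈ ws := (PySem.List.index?_isSome_iff ws "default").mp (by rw [h]; rfl)
  have : 0 < ws.length := List.length_pos_of_mem hmem
  simp [List.length_drop]; omega

def Advanced (Key_words : List String) : List Int × Int :=
  AdvancedLoop Key_words [] 0

-- ===== PORT B =====
def stepB (acc : List Int × Int × Int) (w : String) : List Int × Int × Int :=
  if w == "default" then (acc.1 ++ [acc.2.1], 0, acc.2.2 + 1)
  else if w == "case" then (acc.1, acc.2.1 + 1, acc.2.2)
  else acc

def Advanced_alt (Key_words : List String) : List Int × Int :=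
  let r := Key_words.foldl stepB ([], 0, 0)
  (r.1, r.2.2)

-- ===== PRECONDITION & SPEC =====
def Spec_Advanced (Key_words : List String) (out : List Int × Int) : Prop := out = Advanced_alt Key_words
instance (Key_words : List String) (out : List Int × Int) : Decidable (Spec_Advanced Key_words out) := by unfold Spec_Advanced; infer_instance

-- ===== CLAIM (what is proved, stated in full; the proofs are below) =====
def Claim_equal_Advanced : Prop := ∀ (Key_words : List String), Dom_Advanced Key_words → Spec_Advanced Key_words (Advanced Key_words)

-- ===== LEMMAS AND PROOFS =====

-- A's inner counting fold over a default-free list equals the count of "case".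
lemma countFold (l : List String) (n : Int) :
    l.foldl (fun n word => if word == "case" then n + 1 else n) n = n + l.count "case" := by
  induction l generalizing n with
  | nil => simp
  | cons x xs ih =>
    simp only [List.foldl_cons]
    by_cases hx : x = "case"
    · rw [if_pos (by simpa using hx), ih, List.count_cons, if_pos (by simpa using hx)]
      push_cast; ring
    · rw [if_neg (by simpa using hx), ih, List.count_cons, if_neg (by simpa using hx)]
      simp

-- B's fold over a default-free list only accumulates the running case counter.
lemma foldB_nodefault (l : List String) (cn : List Int) (cur sn : Int)
    (h : "default" ∉ l) :
    l.foldl stepB (cn, cur, sn) = (cn, cur + l.count "case", sn) := by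
  induction l generalizing cur with
  | nil => simp
  | cons x xs ih =>
    have hx : x ≠ "default" := fun hh => h (hh ▸ List.mem_cons_self)
    have hxs : "default" ∉ xs := fun hh => h (List.mem_cons_of_mem _ hh)
    by_cases hc : x = "case"
    · simp only [List.foldl_cons, stepB, hc]
      simp [ih _ hxs]
      ring
    · simp only [List.foldl_cons, stepB]
      rw [if_neg (by simpa using hx), if_neg (by simpa using hc), ih _ hxs]
      simp [hc]

lemma loop_eq (n : Nat) : ∀ (ws : List String), ws.length = n → ∀ (cn : List Int) (sn : Int),
    AdvancedLoop ws cn sn = ((ws.foldl stepB (cn, 0, sn)).1, (ws.foldl stepB (cn, 0, sn)).2.2) := by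
  induction n using Nat.strong_induction_on with
  | _ n ih =>
    intro ws hlen cn sn
    rw [AdvancedLoop]
    cases h : PySem.List.index? ws "default" with
    | none =>
      have hnm : "default" ∉ ws := (PySem.List.index?_eq_none_iff ws "default").mp h
      simp [foldB_nodefault ws cn 0 sn hnm]
    | some k =>
      obtain ⟨pre, suf, hws, hk, hnp⟩ := (PySem.List.index?_eq_some_iff ws "default" k).mp h
      simp only
      rw [PySem.List.slice_to_natCast, PySem.List.slice_from_natCast]
      have htake : ws.take k = pre := by
        rw [hws, ← hk, List.take_left]
      have hdrop : ws.drop (k + 1) = suf := by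
        rw [hws, ← hk]
        rw [show pre.length + 1 = (pre ++ ["default"]).length by simp]
        rw [show pre ++ "default" :: suf = (pre ++ ["default"]) ++ suf by simp]
        exact List.drop_left
      have hsuf : suf.length < n := by
        subst hws; simp at hlen; omega
      rw [htake, hdrop, ih suf.length hsuf suf rfl]
      rw [hws]
      rw [List.foldl_append]
      rw [foldB_nodefault pre cn 0 sn hnp]
      have hstep : stepB (cn, 0 + (pre.count "case" : Int), sn) "default"
          = (cn ++ [0 + (pre.count "case" : Int)], 0, sn + 1) := by
        simp [stepB]
      simp only [List.foldl_cons, hstep, countFold]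

-- ===== VERDICT (by name: the statement is the Claim_ definition above) =====
theorem Advanced_spec : Claim_equal_Advanced := by
  intro ws _
  unfold Spec_Advanced Advanced Advanced_alt
  exact loop_eq ws.length ws rfl [] 0
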